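-- pv_equiv track=rewrite | github.com/Sondren1288/simple-maths | functions.py | louville_distance
-- ===== SOURCE A (Python) =====
-- def factorial(num):
-- 	"""
-- 	The factorial of a number.
-- 	On average barely quickar than product(range(1, num))
-- 	"""
-- 	# Factorial of 0 equals 1
-- 	if num == 0:
-- 		return 1
--
-- 	#if not, it is the product from 1...num
-- 	product = 1
-- 	for integer in range(1, num + 1):
-- 		product *= integer
-- 	return product
--
-- def louville_distance(precision):
-- 	"""
-- 	Finds the distance between in zeroes between 2 '1's in the
-- 	louville number.
-- 	Will return distances, so if you sum earlier numbers together
-- 	you get the index at which there would have been a '1'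
-- 	"""
-- 	precision += 1 		# To get far enouh
-- 	distances = []
--
-- 	for index in range(1, precision):
-- 		try:
-- 			distances.append(factorial(index) - factorial(index - 1))
-- 		except IndexError:
-- 			break
--
-- 	distances[0] = 1 # Because of the way the list is structured
-- 	return distances
-- ===== SOURCE B (Python) =====
-- def louville_distance(precision):
--     if precision < 1:
--         return []
--     distances = [1]
--     fact = 1  # running (i-1)!
--     for i in range(2, precision + 1):
--         distances.append(fact * (i - 1))  # i! - (i-1)! = (i-1)!*(i-1)
--         fact *= i
--     return distances
-- ===== Notes on version B (the rewrite author's own statement) =====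
-- stated objective: faster
-- what changed: B replaces A's per-index factorial recomputation (factorial(i) and factorial(i-1) from scratch each iteration) by a single running factorial and the identity i! - (i-1)! = (i-1)!*(i-1), one multiply per step.
-- crash fix: For precision <= 0 A raises IndexError (distances is empty when A assigns distances[0] = 1); B returns []. — e.g. on louville_distance(0): A raises IndexError, B returns []
import Mathlib
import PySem

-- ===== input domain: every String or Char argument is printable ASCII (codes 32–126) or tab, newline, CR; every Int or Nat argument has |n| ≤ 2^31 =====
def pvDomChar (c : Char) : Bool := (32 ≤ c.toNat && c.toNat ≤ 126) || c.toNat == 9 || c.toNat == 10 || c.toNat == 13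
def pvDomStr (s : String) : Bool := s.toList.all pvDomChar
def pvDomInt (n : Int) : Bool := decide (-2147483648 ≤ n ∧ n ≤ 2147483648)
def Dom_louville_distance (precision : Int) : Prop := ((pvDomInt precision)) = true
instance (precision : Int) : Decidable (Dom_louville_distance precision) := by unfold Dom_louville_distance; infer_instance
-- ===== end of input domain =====

-- B maintains one running factorial (one multiply per step, via i! - (i-1)! = (i-1)!*(i-1))
-- instead of A's recomputation of two factorials from scratch at every index.

-- ===== PORT A =====
def pvFactorial (num : Int) : Int :=
  if num == 0 then 1
  else (PySem.List.pyRange 1 (num + 1) 1).foldl (fun product integer => product * integer) 1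

def louville_distance (precision : Int) : List Int :=
  let precision := precision + 1
  let distances : List Int :=
    (PySem.List.pyRange 1 precision 1).foldl
      (fun acc index => acc ++ [pvFactorial index - pvFactorial (index - 1)]) []
  match distances with
  | [] => []            -- Python raises IndexError at `distances[0] = 1`; excluded by Pre_
  | _ :: t => 1 :: t    -- distances[0] = 1

-- ===== PORT B =====
def louville_distance_alt (precision : Int) : List Int :=
  if precision < 1 then []
  else
    ((PySem.List.pyRange 2 (precision + 1) 1).foldl
      (fun (s : List Int × Int) i => (s.1 ++ [s.2 * (i - 1)], s.2 * i)) ([1], 1)).1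

-- ===== PRECONDITION & SPEC =====
-- A raises IndexError for precision ≤ 0 (distances is empty when it assigns distances[0] = 1).
def Pre_louville_distance (precision : Int) : Prop := 1 ≤ precision
instance (precision : Int) : Decidable (Pre_louville_distance precision) := by unfold Pre_louville_distance; infer_instance
def pvWitness_louville_distance : Int := 3

-- For precision ≤ 0 A raises IndexError; B returns [].
def Raises_louville_distance (precision : Int) : Prop := precision ≤ 0
instance (precision : Int) : Decidable (Raises_louville_distance precision) := by unfold Raises_louville_distance; infer_instance
def pvRaiseWitness_louville_distance : Int := 0
def pvRaiseWitnessOut_louville_distance : List Int := []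

def Spec_louville_distance (precision : Int) (out : List Int) : Prop := out = louville_distance_alt precision
instance (precision : Int) (out : List Int) : Decidable (Spec_louville_distance precision out) := by unfold Spec_louville_distance; infer_instance

-- ===== CLAIM (what is proved, stated in full; the proofs are below) =====
def Claim_equal_louville_distance : Prop := ∀ (precision : Int), Dom_louville_distance precision → Pre_louville_distance precision → Spec_louville_distance precision (louville_distance precision)
def Claim_raises_louville_distance : Prop := (∀ (precision : Int), Dom_louville_distance precision → Raises_louville_distance precision → ¬ Pre_louville_distance precision) ∧ (Dom_louville_distance (pvRaiseWitness_louville_distance) ∧ Raises_louville_distance (pvRaiseWitness_louville_distance) ∧ louville_distance_alt (pvRaiseWitness_louville_distance) = pvRaiseWitnessOut_louville_distance)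

-- ===== LEMMAS AND PROOFS =====

-- i! = (i-1)! * i for 0 ≤ i
theorem pvFactorial_succ (n : Int) (hn : 0 ≤ n) :
    pvFactorial (n + 1) = pvFactorial n * (n + 1) := by
  rcases eq_or_lt_of_le hn with h | h
  · subst h; decide
  · have h1 : (1:Int) ≤ n := h
    unfold pvFactorial
    rw [if_neg (by simp; omega), if_neg (by simp; omega),
        PySem.List.pyRange_one_succ_right (by omega : (1:Int) ≤ n + 1),
        List.foldl_append]
    simp

def pvAList (p : Int) : List Int :=
  (PySem.List.pyRange 1 (p + 1) 1).foldl
    (fun acc index => acc ++ [pvFactorial index - pvFactorial (index - 1)]) []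

def pvBState (p : Int) : List Int × Int :=
  (PySem.List.pyRange 2 (p + 1) 1).foldl
    (fun (s : List Int × Int) i => (s.1 ++ [s.2 * (i - 1)], s.2 * i)) ([1], 1)

theorem pv_inv (n : Nat) :
    ∃ t : List Int, pvAList (1 + n) = 0 :: t ∧
      pvBState (1 + n) = (1 :: t, pvFactorial (1 + n)) := by
  induction n with
  | zero => exact ⟨[], by decide, by decide⟩
  | succ m ih =>
    obtain ⟨t, hA, hB⟩ := ih
    set p : Int := 1 + m with hp
    have hp1 : (1:Int) ≤ p := by omega
    have hfs : pvFactorial (p + 1) = pvFactorial p * (p + 1) :=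
      pvFactorial_succ p (by omega)
    refine ⟨t ++ [pvFactorial p * p], ?_, ?_⟩
    · have hr : PySem.List.pyRange 1 (p + 1 + 1) 1
          = PySem.List.pyRange 1 (p + 1) 1 ++ [p + 1] :=
        PySem.List.pyRange_one_succ_right (by omega)
      have : pvAList (1 + (m + 1 : Nat)) = pvAList p ++ [pvFactorial (p + 1) - pvFactorial p] := by
        unfold pvAList
        have he : (1 : Int) + ((m : Int) + 1) + 1 = p + 1 + 1 := by omega
        rw [show ((1:Int) + ((m + 1 : Nat) : Int)) = 1 + ((m : Int) + 1) by push_cast; ring,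
            he, hr, List.foldl_append]
        simp [hp]
      rw [this, hA, hfs]
      simp; ring
    · have hr : PySem.List.pyRange 2 (p + 1 + 1) 1
          = PySem.List.pyRange 2 (p + 1) 1 ++ [p + 1] :=
        PySem.List.pyRange_one_succ_right (by omega)
      have : pvBState (1 + (m + 1 : Nat)) =
          ((pvBState p).1 ++ [(pvBState p).2 * (p + 1 - 1)], (pvBState p).2 * (p + 1)) := by
        unfold pvBState
        have he : (1 : Int) + ((m : Int) + 1) + 1 = p + 1 + 1 := by omega
        rw [show ((1:Int) + ((m + 1 : Nat) : Int)) = 1 + ((m : Int) + 1) by push_cast; ring,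
            he, hr, List.foldl_append]
        simp [hp]
      rw [this, hB]
      have hcast : pvFactorial (1 + ((m + 1 : Nat) : Int)) = pvFactorial p * (p + 1) := by
        rw [show (1:Int) + ((m + 1 : Nat) : Int) = p + 1 by push_cast; ring]; exact hfs
      rw [hcast]
      simp

-- ===== VERDICT (by name: the statement is the Claim_ definition above) =====
theorem louville_distance_spec : Claim_equal_louville_distance := by
  intro precision _ hpre
  unfold Spec_louville_distance louville_distance louville_distance_alt
  have hpre' : (1:Int) ≤ precision := hpre
  obtain ⟨n, hn⟩ : ∃ n : Nat, precision = 1 + (n : Int) :=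
    ⟨(precision - 1).toNat, by omega⟩
  obtain ⟨t, hA, hB⟩ := pv_inv n
  rw [hn]
  rw [if_neg (by omega)]
  have hA' : (PySem.List.pyRange 1 (1 + (n:Int) + 1) 1).foldl
      (fun acc index => acc ++ [pvFactorial index - pvFactorial (index - 1)]) [] = 0 :: t := hA
  have hB' : ((PySem.List.pyRange 2 (1 + (n:Int) + 1) 1).foldl
      (fun (s : List Int × Int) i => (s.1 ++ [s.2 * (i - 1)], s.2 * i)) ([1], 1)).1 = 1 :: t := by
    rw [show ((PySem.List.pyRange 2 (1 + (n:Int) + 1) 1).foldl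
      (fun (s : List Int × Int) i => (s.1 ++ [s.2 * (i - 1)], s.2 * i)) ([1], 1)) = pvBState (1 + n) from rfl, hB]
  simp only [hA', hB']

theorem louville_distance_raises : Claim_raises_louville_distance := by
  unfold Claim_raises_louville_distance
  constructor
  · intro p _ hr hp
    exact absurd hp (by unfold Pre_louville_distance Raises_louville_distance at *; omega)
  · exact ⟨by decide, by decide, by decide⟩

-- self-check: the raises claim together with the Pre_ witness (keeps the raise theorem referenced)
theorem louville_distance_raises_ok :
    Claim_raises_louville_distance ∧ Pre_louville_distance pvWitness_louville_distance :=
  ⟨louville_distance_raises, by decide⟩
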